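-- pv_equiv track=rewrite | github.com/pypi-data/pypi-mirror-218 | packages/phylotreeclus/phylotreeclus-1.0.1-py3-none-any.whl/PhyloTreeClustering/PhyloTreeClustering.py | rearrange_colors
-- ===== SOURCE A (Python) =====
-- def rearrange_colors(colors_dict):
--     '''
--     This function rearranges the colors in the color dictionary so that there is no repetition.
--     '''
--     colors = colors_dict.values()
--     modified_colors = {}
--     modified_colors['black'] = 'black'
--     counter = 0
--
--     for color in colors:
--         if color not in modified_colors:
--             modified_colors[color] = 'C' + str(counter)
--             counter += 1
--
--     result = [modified_colors[color] for color in colors]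
--     return {name : color for name, color in zip(colors_dict.keys(), result)}
-- ===== SOURCE B (Python) =====
-- def rearrange_colors(colors_dict):
--     '''
--     Positional recomputation: each non-black color's canonical index is the number
--     of distinct non-black colors occurring before its first occurrence in the values.
--     No counter and no color-mapping dict are maintained.
--     '''
--     vals = list(colors_dict.values())
--     out = {}
--     for name, c in colors_dict.items():
--         if c == 'black':
--             out[name] = 'black'
--         else:
--             j = vals.index(c)
--             out[name] = 'C' + str(len({v for v in vals[:j] if v != 'black'}))
--     return out
-- ===== Notes on version B (the rewrite author's own statement) =====
-- stated objective: alternative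
-- what changed: Instead of A's stateful counter + mapping dict built over the values, B computes each non-black color's canonical index positionally: the number of distinct non-black colors before its first occurrence (via .index and a set over the preceding slice), trading A's O(n) incremental state for stateless O(n^2) per-entry recomputation.
import Mathlib
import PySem

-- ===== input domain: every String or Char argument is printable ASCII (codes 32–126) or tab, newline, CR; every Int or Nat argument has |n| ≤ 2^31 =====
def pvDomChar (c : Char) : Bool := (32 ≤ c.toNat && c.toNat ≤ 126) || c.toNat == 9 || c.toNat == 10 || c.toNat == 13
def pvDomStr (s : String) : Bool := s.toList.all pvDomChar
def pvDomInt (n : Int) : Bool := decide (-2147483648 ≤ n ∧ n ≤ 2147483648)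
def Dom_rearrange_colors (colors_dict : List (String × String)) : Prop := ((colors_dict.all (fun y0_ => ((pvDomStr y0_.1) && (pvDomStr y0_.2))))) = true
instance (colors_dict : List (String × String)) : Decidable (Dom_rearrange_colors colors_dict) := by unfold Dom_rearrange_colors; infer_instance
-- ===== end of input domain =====

-- B recomputes each non-black color's canonical index positionally (distinct non-black
-- colors before its first occurrence) instead of maintaining A's counter + mapping dict;
-- objective: alternative. Proved equal on all inputs of Dom.

-- ===== PORT A =====
-- the 'for color in colors' loop body: state = (modified_colors, counter)
def pvStepA (st : PySem.Dict String String × Int) (color : String) :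
    PySem.Dict String String × Int :=
  if st.1.contains color then st
  else (st.1.insert color ("C" ++ PySem.Int.toStr st.2), st.2 + 1)

def rearrange_colors (colors_dict : List (String × String)) : List (String × String) :=
  let colors := colors_dict.map Prod.snd
  let m := (colors.foldl pvStepA ((PySem.Dict.empty.insert "black" "black"), 0)).1
  -- modified_colors[color]: the key is always present here (inserted by the loop), so getD is exact
  let result := colors.map (fun c => m.getD c "")
  (((colors_dict.map Prod.fst).zip result).foldl
      (fun d p => d.insert p.1 p.2) PySem.Dict.empty).items

-- ===== PORT B =====
def rearrange_colors_alt (colors_dict : List (String × String)) : List (String × String) :=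
  let vals := colors_dict.map Prod.snd
  (colors_dict.foldl
    (fun out p =>
      if p.2 = "black" then out.insert p.1 "black"
      else
        match PySem.List.index? vals p.2 with
        | some j =>
            out.insert p.1 ("C" ++ PySem.Int.toStr
              (((PySem.Set.ofList ((vals.take j).filter (fun v => !(v == "black")))).length : Int)))
        | none => out   -- unreachable: p.2 ∈ vals, so vals.index(p.2) cannot raise
    ) PySem.Dict.empty).items

-- ===== PRECONDITION & SPEC =====
def Spec_rearrange_colors (colors_dict : List (String × String)) (out : List (String × String)) : Prop := out = rearrange_colors_alt colors_dict
instance (colors_dict : List (String × String)) (out : List (String × String)) : Decidable (Spec_rearrange_colors colors_dict out) := by unfold Spec_rearrange_colors; infer_instance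

-- ===== CLAIM (what is proved, stated in full; the proofs are below) =====
def Claim_equal_rearrange_colors : Prop := ∀ (colors_dict : List (String × String)), Dom_rearrange_colors colors_dict → Spec_rearrange_colors colors_dict (rearrange_colors colors_dict)

-- ===== LEMMAS AND PROOFS =====

-- A's initial mapping dict {'black': 'black'}
def pvD0 : PySem.Dict String String := PySem.Dict.empty.insert "black" "black"

-- number of distinct non-black colors in a list, as an Int (A's counter value)
def pvNB (vals : List String) : Int :=
  ((PySem.Set.ofList (vals.filter (fun v => !(v == "black")))).length : Int)

theorem pvOfList_append_singleton (l : List String) (x : String) :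
    PySem.Set.ofList (l ++ [x]) =
      if x ∈ l then PySem.Set.ofList l else PySem.Set.ofList l ++ [x] := by
  rw [PySem.Set.ofList_eq_foldl, List.foldl_append, ← PySem.Set.ofList_eq_foldl]
  by_cases h : x ∈ l
  · have hx : x ∈ PySem.Set.ofList l := (PySem.Set.mem_ofList l x).2 h
    simp [List.foldl, PySem.Set.add, PySem.Set.contains, hx, h]
  · have hx : x ∉ PySem.Set.ofList l := fun hm => h ((PySem.Set.mem_ofList l x).1 hm)
    simp [List.foldl, PySem.Set.add, PySem.Set.contains, hx, h]

theorem pvNB_append (l : List String) (x : String) :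
    pvNB (l ++ [x]) = if x = "black" ∨ x ∈ l then pvNB l else pvNB l + 1 := by
  unfold pvNB
  rw [List.filter_append]
  by_cases hb : x = "black"
  · simp [hb]
  · have hfx : List.filter (fun v => !(v == "black")) [x] = [x] := by simp [hb]
    rw [hfx, pvOfList_append_singleton]
    by_cases hm : x ∈ l
    · have : x ∈ l.filter (fun v => !(v == "black")) := List.mem_filter.2 ⟨hm, by simp [hb]⟩
      simp [this, hb, hm]
    · have : x ∉ l.filter (fun v => !(v == "black")) := fun h => hm (List.mem_filter.1 h).1
      simp [this, hb, hm]

-- the label B computes, unchanged when the list is extended on the right past c's first occurrence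
theorem pvTake_index_append (l : List String) (x c : String) (hc : c ∈ l) :
    (l ++ [x]).take ((PySem.List.index? (l ++ [x]) c).getD 0) =
      l.take ((PySem.List.index? l c).getD 0) := by
  rw [PySem.List.index?_append_of_mem [x] hc]
  obtain ⟨j, hj⟩ := Option.isSome_iff_exists.1 ((PySem.List.index?_isSome_iff l c).2 hc)
  obtain ⟨hlt, -, -⟩ := PySem.List.getElem_of_index?_eq_some hj
  rw [hj]
  exact List.take_append_of_le_length (le_of_lt hlt)

-- main invariant of A's mapping-build loop, characterised positionally (B's view)
theorem pvInvariant (vals : List String) :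
    (vals.foldl pvStepA (pvD0, 0)).2 = pvNB vals ∧
    (vals.foldl pvStepA (pvD0, 0)).1.get? "black" = some "black" ∧
    ∀ c, c ≠ "black" →
      (vals.foldl pvStepA (pvD0, 0)).1.get? c =
        if c ∈ vals then
          some ("C" ++ PySem.Int.toStr (pvNB (vals.take ((PySem.List.index? vals c).getD 0))))
        else none := by
  induction vals using List.reverseRecOn with
  | nil =>
    refine ⟨by simp [pvNB], PySem.Dict.get?_insert_self _ _ _, ?_⟩
    intro c hc
    simp [pvD0, PySem.Dict.get?_insert_of_ne _ _ hc, PySem.Dict.get?_empty]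
  | append_singleton l x ih =>
    obtain ⟨ih1, ih2, ih3⟩ := ih
    rw [List.foldl_append]
    simp only [List.foldl_cons, List.foldl_nil]
    set st := l.foldl pvStepA (pvD0, 0) with hst
    by_cases hbx : x = "black"
    · -- x = "black": already bound, state unchanged
      have hcx : st.1.contains x = true := by
        rw [PySem.Dict.contains_eq_isSome_get?, hbx, ih2]; rfl
      have hstep : pvStepA st x = st := by simp [pvStepA, hcx]
      rw [hstep]
      refine ⟨by rw [ih1, pvNB_append, if_pos (Or.inl hbx)], ih2, ?_⟩
      intro c hc
      rw [ih3 c hc]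
      have hcnex : c ≠ x := fun h => hc (h.trans hbx)
      by_cases hm : c ∈ l
      · rw [if_pos hm, if_pos (List.mem_append_left _ hm), pvTake_index_append l x c hm]
      · rw [if_neg hm, if_neg (by simp [hm, hcnex])]
    · by_cases hmx : x ∈ l
      · -- x seen before: already bound, state unchanged
        have hcx : st.1.contains x = true := by
          rw [PySem.Dict.contains_eq_isSome_get?, ih3 x hbx, if_pos hmx]; rfl
        have hstep : pvStepA st x = st := by simp [pvStepA, hcx]
        rw [hstep]
        refine ⟨by rw [ih1, pvNB_append, if_pos (Or.inr hmx)], ih2, ?_⟩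
        intro c hc
        rw [ih3 c hc]
        by_cases hm : c ∈ l
        · rw [if_pos hm, if_pos (List.mem_append_left _ hm), pvTake_index_append l x c hm]
        · have hcnex : c ≠ x := fun h => hm (h ▸ hmx)
          rw [if_neg hm, if_neg (by simp [hm, hcnex])]
      · -- x is a new non-black color: gets label C<counter>, counter increments
        have hcx : st.1.contains x = false := by
          rw [PySem.Dict.contains_eq_isSome_get?, ih3 x hbx, if_neg hmx]; rfl
        have hstep : pvStepA st x = (st.1.insert x ("C" ++ PySem.Int.toStr st.2), st.2 + 1) := by
          simp [pvStepA, hcx]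
        rw [hstep]
        refine ⟨by rw [ih1, pvNB_append, if_neg (by simp [hbx, hmx])], ?_, ?_⟩
        · rw [PySem.Dict.get?_insert_of_ne _ _ (fun h => hbx h.symm), ih2]
        · intro c hc
          by_cases hcex : c = x
          · subst hcex
            rw [PySem.Dict.get?_insert_self, if_pos (List.mem_append_right _ (by simp)),
              PySem.List.index?_append_singleton_self l c hmx]
            have : (l ++ [c]).take ((some l.length).getD 0) = l := by
              simp [List.take_append_of_le_length (Nat.le_refl _)]
            rw [this, ih1]
          · rw [PySem.Dict.get?_insert_of_ne _ _ hcex, ih3 c hc]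
            by_cases hm : c ∈ l
            · rw [if_pos hm, if_pos (List.mem_append_left _ hm), pvTake_index_append l x c hm]
            · rw [if_neg hm, if_neg (by simp [hm, hcex])]

-- ===== VERDICT (by name: the statement is the Claim_ definition above) =====
theorem rearrange_colors_spec : Claim_equal_rearrange_colors := by
  intro cd _
  unfold Spec_rearrange_colors rearrange_colors rearrange_colors_alt
  rw [show (PySem.Dict.empty.insert "black" "black" : PySem.Dict String String) = pvD0 from rfl]
  dsimp only
  obtain ⟨inv1, inv2, inv3⟩ := pvInvariant (cd.map Prod.snd)
  congr 1
  rw [List.map_map, List.zip_map', List.foldl_map]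
  refine PySem.List.foldl_congr_mem _ _ _ _ (fun acc p hp => ?_)
  dsimp only
  simp only [Function.comp_apply]
  have hpv : p.2 ∈ cd.map Prod.snd := List.mem_map_of_mem hp
  by_cases hb : p.2 = "black"
  · rw [if_pos hb, hb, PySem.Dict.getD_of_get?_eq_some _ "" inv2]
  · obtain ⟨j, hj⟩ :=
      Option.isSome_iff_exists.1 ((PySem.List.index?_isSome_iff (cd.map Prod.snd) p.2).2 hpv)
    have hg : ((cd.map Prod.snd).foldl pvStepA (pvD0, 0)).1.getD p.2 ""
        = "C" ++ PySem.Int.toStr (pvNB ((cd.map Prod.snd).take j)) :=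
      PySem.Dict.getD_of_get?_eq_some _ "" (by rw [inv3 p.2 hb, if_pos hpv, hj]; rfl)
    rw [if_neg hb, hj, hg]
    simp [pvNB]
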